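-- pv_equiv track=rewrite | github.com/LaKHamote/Lixo | Estrutura de Dados/quase_palindromo.py | quase_palindromo
-- ===== SOURCE A (Python) =====
-- def quase_palindromo(word, um_erro):
--     if len(word) == 0:
--         return True
--     elif word[0] == word[-1]:
--         return quase_palindromo(word[1:-1], um_erro)
--     elif not um_erro:
--         um_erro = True
--         return quase_palindromo(word[1:-1], um_erro)
--     else:
--         return False
-- ===== SOURCE B (Python) =====
-- def quase_palindromo(word, um_erro):
--     err = um_erro
--     i, j = 0, len(word) - 1
--     while i < j:
--         if word[i] != word[j]:
--             if err:
--                 return False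
--             err = True
--         i += 1
--         j -= 1
--     return True
-- ===== Notes on version B (the rewrite author's own statement) =====
-- stated objective: faster
-- what changed: replaced slice-based recursion (each step copies word[1:-1]) by an in-place two-pointer scan with an error flag
import Mathlib
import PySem

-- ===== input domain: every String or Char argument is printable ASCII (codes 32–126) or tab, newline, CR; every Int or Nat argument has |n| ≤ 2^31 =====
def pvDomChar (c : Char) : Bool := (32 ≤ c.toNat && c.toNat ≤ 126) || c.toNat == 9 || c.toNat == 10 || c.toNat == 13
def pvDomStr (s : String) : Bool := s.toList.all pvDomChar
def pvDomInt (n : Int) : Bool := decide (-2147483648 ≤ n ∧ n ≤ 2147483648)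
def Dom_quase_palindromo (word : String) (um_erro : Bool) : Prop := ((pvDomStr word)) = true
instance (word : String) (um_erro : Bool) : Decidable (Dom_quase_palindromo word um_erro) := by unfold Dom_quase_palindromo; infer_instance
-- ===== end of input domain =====

-- B replaces A's slice-copying recursion by a two-pointer index scan with an error flag.

-- ===== PORT A =====
-- A's recursion on the characters: word[0] is the head, word[-1] is the last
-- character, word[1:-1] is the tail without its last element.
def pvQpA : List Char → Bool → Bool
  | [], _ => true
  | c :: rest, um_erro =>
    if c = rest.getLastD c then pvQpA rest.dropLast um_erro
    else if !um_erro then pvQpA rest.dropLast true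
    else false
termination_by l => l.length
decreasing_by all_goals simp [List.length_dropLast]

def quase_palindromo (word : String) (um_erro : Bool) : Bool :=
  pvQpA word.toList um_erro

-- ===== PORT B =====
-- B's while-loop: indices i, j move inward, err records the one allowed mismatch.
def pvQpBloop (cs : List Char) (i j : Nat) (err : Bool) : Bool :=
  if i < j then
    if cs.getD i ' ' ≠ cs.getD j ' ' then
      if err then false
      else pvQpBloop cs (i + 1) (j - 1) true
    else pvQpBloop cs (i + 1) (j - 1) err
  else true
termination_by j - i
decreasing_by all_goals omega

def quase_palindromo_alt (word : String) (um_erro : Bool) : Bool :=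
  pvQpBloop word.toList 0 (word.toList.length - 1) um_erro

-- ===== PRECONDITION & SPEC =====
def Spec_quase_palindromo (word : String) (um_erro : Bool) (out : Bool) : Prop := out = quase_palindromo_alt word um_erro
instance (word : String) (um_erro : Bool) (out : Bool) : Decidable (Spec_quase_palindromo word um_erro out) := by unfold Spec_quase_palindromo; infer_instance

-- ===== CLAIM (what is proved, stated in full; the proofs are below) =====
def Claim_equal_quase_palindromo : Prop := ∀ (word : String) (um_erro : Bool), Dom_quase_palindromo word um_erro → Spec_quase_palindromo word um_erro (quase_palindromo word um_erro)

-- ===== LEMMAS AND PROOFS =====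

-- Shifting window: the loop on c :: mid ++ [d] with both indices shifted by one
-- is the loop on mid, as long as the right index stays inside mid.
theorem pvQpBloop_shift (c d : Char) (mid : List Char) :
    ∀ i j e, j < mid.length →
      pvQpBloop (c :: mid ++ [d]) (i + 1) (j + 1) e = pvQpBloop mid i j e := by
  intro i j
  induction hn : j - i using Nat.strong_induction_on generalizing i j with
  | _ n ih =>
    intro e hj
    conv_lhs => rw [pvQpBloop]
    conv_rhs => rw [pvQpBloop]
    by_cases hij : i < j
    · have hi : i < mid.length := lt_trans hij hj
      have hg1 : (c :: mid ++ [d]).getD (i + 1) ' ' = mid.getD i ' ' := by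
        simp [List.getD, List.getElem?_append_left hi]
      have hg2 : (c :: mid ++ [d]).getD (j + 1) ' ' = mid.getD j ' ' := by
        simp [List.getD, List.getElem?_append_left hj]
      have hij' : i + 1 < j + 1 := by omega
      have hstep : (j + 1) - 1 = (j - 1) + 1 := by omega
      have hrec : ∀ e', pvQpBloop (c :: mid ++ [d]) (i + 1 + 1) (j + 1 - 1) e'
          = pvQpBloop mid (i + 1) (j - 1) e' := by
        intro e'
        rw [hstep]
        exact ih ((j - 1) - (i + 1)) (by omega) (i + 1) (j - 1) rfl e' (by omega)
      simp only [if_pos hij, if_pos hij', hg1, hg2]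
      split_ifs with hne he
      · rfl
      · exact hrec true
      · exact hrec e
    · have hij' : ¬ i + 1 < j + 1 := by omega
      simp [hij, hij']

-- Main lemma: A's recursion equals B's two-pointer loop, by strong induction on length.
theorem pvQp_eq : ∀ n (l : List Char) e, l.length ≤ n →
    pvQpA l e = pvQpBloop l 0 (l.length - 1) e := by
  intro n
  induction n with
  | zero =>
    intro l e hl
    have : l = [] := List.eq_nil_of_length_eq_zero (by omega)
    subst this
    rw [pvQpA, pvQpBloop]; simp
  | succ n ih =>
    intro l e hl
    match l with
    | [] => rw [pvQpA, pvQpBloop]; simp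
    | c :: rest =>
      match hrest : rest.reverse with
      | [] =>
        have : rest = [] := by simpa using congrArg List.reverse hrest
        subst this
        conv_lhs => rw [pvQpA]
        conv_rhs => rw [pvQpBloop]
        simp [pvQpA]
      | d :: midrev =>
        obtain ⟨mid, hr⟩ : ∃ mid, rest = mid ++ [d] :=
          ⟨midrev.reverse, by simpa using congrArg List.reverse hrest⟩
        subst hr
        have hlast : (mid ++ [d]).getLastD c = d := by simp
        have hdrop : (mid ++ [d]).dropLast = mid := by simp
        have hlen : (mid ++ [d]).length = mid.length + 1 := by simp
        have hlenmid : mid.length ≤ n := by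
          simp [List.length_cons, hlen] at hl; omega
        have hBrec : ∀ e', pvQpBloop (c :: mid ++ [d]) 1 ((mid ++ [d]).length - 1) e'
            = pvQpBloop mid 0 (mid.length - 1) e' := by
          intro e'
          rw [hlen, Nat.add_sub_cancel]
          rcases hm : mid.length with _ | m
          · have hmz : mid = [] := List.eq_nil_of_length_eq_zero hm
            subst hmz
            conv_lhs => rw [pvQpBloop]
            conv_rhs => rw [pvQpBloop]
            simp
          · simp only [Nat.add_sub_cancel]
            exact pvQpBloop_shift c d mid 0 m e' (by omega)
        have hg0 : (c :: mid ++ [d]).getD 0 ' ' = c := rfl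
        have hgl : (c :: mid ++ [d]).getD ((mid ++ [d]).length) ' ' = d := by
          simp [List.getD, hlen]
        have hA : pvQpA (c :: mid ++ [d]) e
            = if c = d then pvQpA mid e else if !e then pvQpA mid true else false := by
          rw [pvQpA.eq_def]
          show (if c = (mid ++ [d]).getLastD c then pvQpA (mid ++ [d]).dropLast e
              else if (!e) = true then pvQpA (mid ++ [d]).dropLast true else false) = _
          rw [hlast, hdrop]
        have hpos : 0 < (mid ++ [d]).length := by simp
        have hB : pvQpBloop (c :: mid ++ [d]) 0 ((mid ++ [d]).length) e
            = if c ≠ d then (if e then false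
                else pvQpBloop (c :: mid ++ [d]) 1 ((mid ++ [d]).length - 1) true)
              else pvQpBloop (c :: mid ++ [d]) 1 ((mid ++ [d]).length - 1) e := by
          conv_lhs => rw [pvQpBloop]
          simp only [if_pos hpos, hg0, hgl]
        show pvQpA (c :: mid ++ [d]) e
            = pvQpBloop (c :: mid ++ [d]) 0 ((mid ++ [d]).length) e
        rw [hA, hB]
        by_cases hcd : c = d
        · simp only [if_pos hcd, if_neg (show ¬ c ≠ d by simp [hcd])]
          rw [ih mid e hlenmid]
          exact (hBrec e).symm
        · simp only [if_neg hcd, if_pos hcd]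
          cases e with
          | true => simp
          | false =>
            simp only [Bool.not_false, if_neg (by simp : ¬ false = true)]
            rw [ih mid true hlenmid]
            exact (hBrec true).symm

-- ===== VERDICT (by name: the statement is the Claim_ definition above) =====
theorem quase_palindromo_spec : Claim_equal_quase_palindromo := by
  intro word um_erro _
  unfold Spec_quase_palindromo quase_palindromo quase_palindromo_alt
  exact pvQp_eq word.toList.length word.toList um_erro le_rfl
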